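-- pv_equiv track=rewrite | github.com/tarun-227/mars | hard1.py | convert_to_coordinates
-- ===== SOURCE A (Python) =====
-- def convert_to_coordinates(matrix):#function to convert directions to x, y coordinates and make arena
--
--     coordinates = []
--     x_values, y_values = [], []
--
--     for obs in matrix:
--         north, east, south, west = obs
--         x = east - west  # x-coordinate
--         y = north - south  # y-coordinate
--         coordinates.append((x, y))
--         x_values.append(x)
--         y_values.append(y)
--
--     #finding min and max to decide the size of the arena
--     min_x, max_x = min(x_values), max(x_values)
--     min_y, max_y = min(y_values), max(y_values)
--
--     #size of arena
--     width = max_x - min_x + 1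
--     height = max_y - min_y + 1
--
--
--     arena = []
--     #setting all slots as 1
--     for _ in range(height):
--         row = []
--         for _ in range(width):
--             row.append(1)
--         arena.append(row)
--
--     # putting 0 if obstacle exists there
--     for x, y in coordinates:
--         arena[y - min_y][x - min_x] = 0  # Adjust for offset
--
--     return arena
-- ===== SOURCE B (Python) =====
-- def convert_to_coordinates(matrix):
--     coords = [(row[1] - row[3], row[0] - row[2]) for row in matrix]
--     obstacles = set(coords)
--     min_x = min(x for x, _ in coords)
--     max_x = max(x for x, _ in coords)
--     min_y = min(y for _, y in coords)
--     max_y = max(y for _, y in coords)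
--     return [[0 if (x + min_x, y + min_y) in obstacles else 1
--              for x in range(max_x - min_x + 1)]
--             for y in range(max_y - min_y + 1)]
-- ===== Notes on version B (the rewrite author's own statement) =====
-- stated objective: simpler
-- what changed: A fills the whole arena with 1s and then overwrites obstacle cells in a second mutation pass; B builds an obstacle set once and produces the arena in a single comprehension pass that writes 0 or 1 per cell by membership test.
import Mathlib
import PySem

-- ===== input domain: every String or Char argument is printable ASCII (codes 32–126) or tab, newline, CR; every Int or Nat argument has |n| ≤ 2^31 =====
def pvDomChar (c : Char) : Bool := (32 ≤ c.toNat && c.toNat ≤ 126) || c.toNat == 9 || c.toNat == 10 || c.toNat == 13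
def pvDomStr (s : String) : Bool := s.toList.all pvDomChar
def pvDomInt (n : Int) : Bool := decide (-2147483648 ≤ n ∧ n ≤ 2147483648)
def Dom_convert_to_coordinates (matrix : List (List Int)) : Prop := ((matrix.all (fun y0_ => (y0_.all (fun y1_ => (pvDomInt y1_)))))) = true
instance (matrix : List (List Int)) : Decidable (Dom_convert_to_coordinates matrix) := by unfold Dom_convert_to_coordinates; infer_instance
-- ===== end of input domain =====

-- B replaces A's fill-with-1-then-overwrite two-pass arena construction by a single
-- membership-driven pass over the grid against a set of obstacle coordinates (simpler).

-- ===== PORT A =====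
-- One Python statement 'arena[y-min_y][x-min_x] = 0' = read row, set cell, write row back
-- (pyGetD/pySetD are exact under Pre_, where the indices are in range).
def pvWriteZero (mx my : Int) (a : List (List Int)) (p : Int × Int) : List (List Int) :=
  PySem.List.pySetD a (p.2 - my)
    (PySem.List.pySetD (PySem.List.pyGetD a (p.2 - my) []) (p.1 - mx) 0)

def convert_to_coordinates (matrix : List (List Int)) : List (List Int) :=
  let st := matrix.foldl
    (fun (st : List (Int × Int) × List Int × List Int) obs =>
      match obs with
      | [north, east, south, west] =>
          (st.1 ++ [(east - west, north - south)],
           st.2.1 ++ [east - west], st.2.2 ++ [north - south])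
      | _ => st)   -- a row not of length 4 raises ValueError in Python: outside Pre_
    ([], [], [])
  let coordinates := st.1
  let x_values := st.2.1
  let y_values := st.2.2
  -- min/max of an empty list raise ValueError in Python: outside Pre_ (getD unreached there)
  let min_x := (PySem.List.min? x_values (fun v => v)).getD 0
  let max_x := (PySem.List.max? x_values (fun v => v)).getD 0
  let min_y := (PySem.List.min? y_values (fun v => v)).getD 0
  let max_y := (PySem.List.max? y_values (fun v => v)).getD 0
  let width := max_x - min_x + 1
  let height := max_y - min_y + 1
  let arena := (PySem.List.pyRange 0 height 1).foldl
    (fun a _ => a ++ [(PySem.List.pyRange 0 width 1).foldl (fun r _ => r ++ [(1 : Int)]) []]) []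
  coordinates.foldl (pvWriteZero min_x min_y) arena

-- ===== PORT B =====
-- row[1]-row[3], row[0]-row[2]; pyGetD is exact for the length-4 rows Pre_ admits
def pvRowCoord (row : List Int) : Int × Int :=
  (PySem.List.pyGetD row 1 0 - PySem.List.pyGetD row 3 0,
   PySem.List.pyGetD row 0 0 - PySem.List.pyGetD row 2 0)

def convert_to_coordinates_alt (matrix : List (List Int)) : List (List Int) :=
  let coords := matrix.map pvRowCoord
  let obstacles : PySem.Set (Int × Int) := PySem.Set.ofList coords
  let min_x := (PySem.List.min? (coords.map (fun p => p.1)) (fun v => v)).getD 0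
  let max_x := (PySem.List.max? (coords.map (fun p => p.1)) (fun v => v)).getD 0
  let min_y := (PySem.List.min? (coords.map (fun p => p.2)) (fun v => v)).getD 0
  let max_y := (PySem.List.max? (coords.map (fun p => p.2)) (fun v => v)).getD 0
  (PySem.List.pyRange 0 (max_y - min_y + 1) 1).map (fun y =>
    (PySem.List.pyRange 0 (max_x - min_x + 1) 1).map (fun x =>
      if (x + min_x, y + min_y) ∈ obstacles then 0 else 1))

-- ===== PRECONDITION & SPEC =====
-- Pre_ excludes exactly the inputs where Python A raises: the empty matrix (min() of an
-- empty list, ValueError) and rows not of length 4 (tuple unpacking, ValueError).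
def Pre_convert_to_coordinates (matrix : List (List Int)) : Prop :=
  matrix ≠ [] ∧ ∀ row ∈ matrix, row.length = 4
instance (matrix : List (List Int)) : Decidable (Pre_convert_to_coordinates matrix) := by
  unfold Pre_convert_to_coordinates; infer_instance
def pvWitness_convert_to_coordinates : List (List Int) := [[1, 2, 0, 0], [0, 0, 1, 1]]

def Spec_convert_to_coordinates (matrix : List (List Int)) (out : List (List Int)) : Prop := out = convert_to_coordinates_alt matrix
instance (matrix : List (List Int)) (out : List (List Int)) : Decidable (Spec_convert_to_coordinates matrix out) := by unfold Spec_convert_to_coordinates; infer_instance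

-- ===== CLAIM (what is proved, stated in full; the proofs are below) =====
def Claim_equal_convert_to_coordinates : Prop := ∀ (matrix : List (List Int)), Dom_convert_to_coordinates matrix → Pre_convert_to_coordinates matrix → Spec_convert_to_coordinates matrix (convert_to_coordinates matrix)

-- ===== LEMMAS AND PROOFS =====

theorem pv_len4 (r : List Int) (h : r.length = 4) : ∃ a b c d, r = [a, b, c, d] := by
  match r, h with
  | [a, b, c, d], _ => exact ⟨a, b, c, d, rfl⟩

-- A's accumulating triple, characterised as three maps of B's row function.
theorem pv_foldl_triple (m : List (List Int)) (h : ∀ row ∈ m, row.length = 4)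
    (c0 : List (Int × Int)) (x0 y0 : List Int) :
    m.foldl
      (fun (st : List (Int × Int) × List Int × List Int) obs =>
        match obs with
        | [north, east, south, west] =>
            (st.1 ++ [(east - west, north - south)],
             st.2.1 ++ [east - west], st.2.2 ++ [north - south])
        | _ => st)
      (c0, x0, y0)
    = (c0 ++ m.map pvRowCoord,
       x0 ++ (m.map pvRowCoord).map (fun p => p.1),
       y0 ++ (m.map pvRowCoord).map (fun p => p.2)) := by
  induction m generalizing c0 x0 y0 with
  | nil => simp
  | cons r t ih =>
    obtain ⟨a, b, c, d, rfl⟩ := pv_len4 r (h _ (by simp))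
    have hrow : pvRowCoord [a, b, c, d] = (b - d, a - c) := rfl
    simp only [List.foldl_cons, List.map_cons]
    rw [ih (fun row hr => h row (by simp [hr]))]
    simp [hrow]

-- the grid builder both sides reduce to
def pvGrid (H W : Int) (g : Int → Int → Int) : List (List Int) :=
  (PySem.List.pyRange 0 H 1).map (fun y => (PySem.List.pyRange 0 W 1).map (fun x => g y x))

theorem pvGrid_congr (H W : Int) (g1 g2 : Int → Int → Int)
    (h : ∀ y x, 0 ≤ y → y < H → 0 ≤ x → x < W → g1 y x = g2 y x) :
    pvGrid H W g1 = pvGrid H W g2 := by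
  unfold pvGrid
  refine List.map_congr_left (fun y hy => ?_)
  rw [PySem.List.mem_pyRange_one] at hy
  refine List.map_congr_left (fun x hx => ?_)
  rw [PySem.List.mem_pyRange_one] at hx
  exact h y x hy.1 hy.2 hx.1 hx.2

theorem pv_set_map_pyRange {α : Type} (b : Int) (f : Int → α) (i : Int) (v : α)
    (h0 : 0 ≤ i) (h1 : i < b) :
    ((PySem.List.pyRange 0 b 1).map f).set i.toNat v
      = (PySem.List.pyRange 0 b 1).map (fun y => if y = i then v else f y) := by
  apply List.ext_getElem
  · simp
  · intro k hk hk2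
    have hk' : k < (b - 0).toNat := by
      rw [List.length_set, List.length_map, PySem.List.length_pyRange_one] at hk
      exact hk
    have hval : (PySem.List.pyRange 0 b 1)[k]'(by rw [PySem.List.length_pyRange_one]; exact hk')
        = (0 : Int) + k :=
      PySem.List.getElem_pyRange_one 0 b k _
    simp only [List.getElem_set, List.getElem_map, hval]
    by_cases hki : i.toNat = k
    · subst hki
      rw [if_pos rfl, if_pos (by omega)]
    · rw [if_neg hki, if_neg (by omega)]

-- one write of a 0 into the functional grid
theorem pv_write_grid (H W mx my : Int) (g : Int → Int → Int) (p : Int × Int)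
    (hx0 : 0 ≤ p.1 - mx) (hx1 : p.1 - mx < W) (hy0 : 0 ≤ p.2 - my) (hy1 : p.2 - my < H) :
    pvWriteZero mx my (pvGrid H W g) p
      = pvGrid H W (fun y x => if y = p.2 - my ∧ x = p.1 - mx then 0 else g y x) := by
  unfold pvWriteZero pvGrid
  rw [PySem.List.pyGetD_map_pyRange_of_nonneg _ H _ _ hy0 hy1,
      PySem.List.pySetD_of_nonneg _ _ hx0,
      pv_set_map_pyRange W _ _ _ hx0 hx1,
      PySem.List.pySetD_of_nonneg _ _ hy0,
      pv_set_map_pyRange H _ _ _ hy0 hy1]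
  refine List.map_congr_left (fun y hy => ?_)
  by_cases hyp : y = p.2 - my
  · rw [if_pos hyp]
    refine List.map_congr_left (fun x hx => ?_)
    by_cases hxp : x = p.1 - mx
    · simp [hyp, hxp]
    · simp [hyp, hxp]
  · rw [if_neg hyp]
    refine List.map_congr_left (fun x hx => ?_)
    simp [hyp]

-- the whole overwrite loop, pointwise
theorem pv_fold_writes (H W mx my : Int) (cs : List (Int × Int)) (g : Int → Int → Int)
    (hb : ∀ p ∈ cs, 0 ≤ p.1 - mx ∧ p.1 - mx < W ∧ 0 ≤ p.2 - my ∧ p.2 - my < H) :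
    cs.foldl (pvWriteZero mx my) (pvGrid H W g)
      = pvGrid H W (fun y x => if (x + mx, y + my) ∈ cs then 0 else g y x) := by
  induction cs generalizing g with
  | nil => exact pvGrid_congr _ _ _ _ (by intro y x _ _ _ _; simp)
  | cons p t ih =>
    obtain ⟨h1, h2, h3, h4⟩ := hb p (by simp)
    simp only [List.foldl_cons]
    rw [pv_write_grid H W mx my g p h1 h2 h3 h4,
        ih _ (fun q hq => hb q (by simp [hq]))]
    refine pvGrid_congr _ _ _ _ (fun y x _ _ _ _ => ?_)
    by_cases ht : (x + mx, y + my) ∈ t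
    · simp [ht]
    · by_cases hp : (x + mx, y + my) = p
      · have : y = p.2 - my ∧ x = p.1 - mx := by
          have h1 := congrArg Prod.fst hp
          have h2 := congrArg Prod.snd hp
          simp at h1 h2
          omega
        simp [this]
      · have : ¬ (y = p.2 - my ∧ x = p.1 - mx) := by
          rintro ⟨rfl, rfl⟩
          apply hp
          simp only [Prod.ext_iff]
          constructor <;> omega
        simp [ht, hp, this]

-- initial all-ones arena is a pvGrid
theorem pv_init_arena (H W : Int) :
    (PySem.List.pyRange 0 H 1).foldl
      (fun a _ => a ++ [(PySem.List.pyRange 0 W 1).foldl (fun r _ => r ++ [(1 : Int)]) []]) []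
    = pvGrid H W (fun _ _ => 1) := by
  unfold pvGrid
  rw [PySem.List.foldl_append_singleton_eq_map, PySem.List.foldl_append_singleton_eq_map]
  simp

-- ===== VERDICT (by name: the statement is the Claim_ definition above) =====
theorem convert_to_coordinates_spec : Claim_equal_convert_to_coordinates := by
  intro matrix _ hpre
  obtain ⟨hne, hlen⟩ := hpre
  unfold Spec_convert_to_coordinates convert_to_coordinates convert_to_coordinates_alt
  simp only [pv_foldl_triple matrix hlen [] [] [], List.nil_append]
  cases hmx : PySem.List.min? ((matrix.map pvRowCoord).map (fun p => p.1)) (fun v => v) with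
  | none =>
      rw [PySem.List.min?_eq_none_iff] at hmx
      simp at hmx
      exact absurd hmx hne
  | some mx =>
  cases hMx : PySem.List.max? ((matrix.map pvRowCoord).map (fun p => p.1)) (fun v => v) with
  | none =>
      rw [PySem.List.max?_eq_none_iff] at hMx
      simp at hMx
      exact absurd hMx hne
  | some Mx =>
  cases hmy : PySem.List.min? ((matrix.map pvRowCoord).map (fun p => p.2)) (fun v => v) with
  | none =>
      rw [PySem.List.min?_eq_none_iff] at hmy
      simp at hmy
      exact absurd hmy hne
  | some my =>
  cases hMy : PySem.List.max? ((matrix.map pvRowCoord).map (fun p => p.2)) (fun v => v) with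
  | none =>
      rw [PySem.List.max?_eq_none_iff] at hMy
      simp at hMy
      exact absurd hMy hne
  | some My =>
  simp only [Option.getD_some]
  rw [pv_init_arena (My - my + 1) (Mx - mx + 1)]
  rw [pv_fold_writes (My - my + 1) (Mx - mx + 1) mx my _ _ ?_]
  · unfold pvGrid
    refine List.map_congr_left (fun y hy => ?_)
    refine List.map_congr_left (fun x hx => ?_)
    by_cases hmem : ((x + mx, y + my) : Int × Int) ∈ matrix.map pvRowCoord
    · simp [hmem, PySem.Set.mem_ofList]
    · simp [hmem, PySem.Set.mem_ofList]
  · intro p hp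
    have h1 := PySem.List.min?_isMin hmx p.1 (List.mem_map_of_mem hp)
    have h2 := PySem.List.max?_isMax hMx p.1 (List.mem_map_of_mem hp)
    have h3 := PySem.List.min?_isMin hmy p.2 (List.mem_map_of_mem hp)
    have h4 := PySem.List.max?_isMax hMy p.2 (List.mem_map_of_mem hp)
    simp only [] at h1 h2 h3 h4
    refine ⟨by omega, by omega, by omega, by omega⟩
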